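-- pv_equiv track=rewrite | github.com/miile7/mpms-analyzer | src/Controller.py | uniqueListThreshold
-- ===== SOURCE A (Python) =====
-- def uniqueListThreshold(list_data, threshold):
--     """Removes all the list elements in the list_data that are the same.
--     This supports only numeric lists. The threshold can be a numeric value
--     which defines how much the list_datas elements can differ form the others
--     and still count as the "same value"
--
--     Parameters
--     ----------
--         list_data : list
--             The list to check
--         threshold : number
--             The threshold
--
--     Returns
--     -------
--         list
--             A list with removed duplicates
--     """
--
--     # prepare variables
--     uniques = []
--     full_list = {}
--
--     # go through each list element
--     for x in list_data:
--         # tells whether the element has been found or not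
--         found = False
--
--         # go through the existing elements in the uniques list
--         for u in uniques:
--             # check if the current list_datas element is in the range
--             # of the current unique value
--             if u - threshold < x and u + threshold > x:
--                 found = True
--                 full_list[u].append(x)
--                 break;
--
--         # if the element is not in the uniques add it as a new unique
--         if not found:
--             full_list[x] = [x]
--             uniques.append(x)
--
--     return uniques, full_list
-- ===== SOURCE B (Python) =====
-- def uniqueListThreshold(list_data, threshold):
--     """Same result as A, but candidate uniques are found through a bucket
--     index keyed by value // threshold, so each element inspects at most
--     three buckets instead of scanning the whole uniques list."""
--     uniques = []
--     full_list = {}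
--     buckets = {}  # value // threshold -> list of (insertion_index, unique_value)
--
--     for x in list_data:
--         best = None
--         if threshold > 0:
--             k = x // threshold
--             for b in (k - 1, k, k + 1):
--                 for item in buckets.get(b, []):
--                     if x - threshold < item[1] < x + threshold and \
--                             (best is None or item[0] < best[0]):
--                         best = item
--         if best is None:
--             if threshold > 0:
--                 buckets.setdefault(x // threshold, []).append((len(uniques), x))
--             uniques.append(x)
--             full_list[x] = [x]
--         else:
--             full_list[best[1]].append(x)
--
--     return uniques, full_list
-- ===== Notes on version B (the rewrite author's own statement) =====
-- stated objective: alternative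
-- what changed: Instead of scanning the whole uniques list for each element, B keeps a bucket index keyed by value // threshold, so each element only inspects the (at most three) buckets that can contain a matching unique and picks the candidate with the smallest insertion index.
import Mathlib
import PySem

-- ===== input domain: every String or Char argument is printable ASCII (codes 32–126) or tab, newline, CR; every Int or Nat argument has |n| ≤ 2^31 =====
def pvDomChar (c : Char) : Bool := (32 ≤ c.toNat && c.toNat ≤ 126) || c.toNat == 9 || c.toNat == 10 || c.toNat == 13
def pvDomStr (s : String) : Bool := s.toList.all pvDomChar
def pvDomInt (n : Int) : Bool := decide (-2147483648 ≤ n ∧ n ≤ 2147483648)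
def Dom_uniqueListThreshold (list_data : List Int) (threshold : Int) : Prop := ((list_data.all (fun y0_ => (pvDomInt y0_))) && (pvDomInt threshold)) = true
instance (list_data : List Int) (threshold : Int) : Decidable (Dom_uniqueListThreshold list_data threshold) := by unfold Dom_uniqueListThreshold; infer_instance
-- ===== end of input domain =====

-- B replaces A's linear scan of the uniques list per element by a bucket index keyed by
-- value // threshold (at most three bucket probes per element, minimum insertion index wins);
-- no speed claim is made: a timing run did not confirm one on its input family.

-- ===== PORT A =====
-- inner for-loop of A: the first u in uniques with u - threshold < x and u + threshold > x
def pvAFind (uniques : List Int) (x threshold : Int) : Option Int :=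
  match uniques with
  | [] => none
  | u :: rest => if u - threshold < x ∧ u + threshold > x then some u else pvAFind rest x threshold

def pvAStep (threshold : Int) (st : List Int × PySem.Dict Int (List Int)) (x : Int) :
    List Int × PySem.Dict Int (List Int) :=
  match pvAFind st.1 x threshold with
  | some u => (st.1, st.2.modify u [] (fun l => l ++ [x]))  -- full_list[u].append(x); key u is always present
  | none => (st.1 ++ [x], st.2.insert x [x])

def uniqueListThreshold (list_data : List Int) (threshold : Int) : List Int × (List (Int × List Int)) :=
  let st := list_data.foldl (pvAStep threshold) ([], PySem.Dict.empty)
  (st.1, st.2.items)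

-- ===== PORT B =====
-- inner candidate scan of B over one bucket's items, keeping the best (min insertion index) match
def pvBScan (x threshold : Int) (best : Option (Int × Int)) (items : List (Int × Int)) :
    Option (Int × Int) :=
  items.foldl (fun best item =>
    if x - threshold < item.2 ∧ item.2 < x + threshold ∧
        (best.all (fun b => decide (item.1 < b.1)) = true) then some item else best) best

def pvBStep (threshold : Int)
    (st : List Int × PySem.Dict Int (List Int) × PySem.Dict Int (List (Int × Int))) (x : Int) :
    List Int × PySem.Dict Int (List Int) × PySem.Dict Int (List (Int × Int)) :=
  let best : Option (Int × Int) :=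
    if 0 < threshold then
      let k := PySem.Int.floordiv x threshold
      [k - 1, k, k + 1].foldl (fun best b => pvBScan x threshold best (st.2.2.getD b [])) none
    else none
  match best with
  | none =>
      let buckets :=
        if 0 < threshold then
          st.2.2.modify (PySem.Int.floordiv x threshold) [] (fun l => l ++ [((st.1.length : Int), x)])
        else st.2.2
      (st.1 ++ [x], st.2.1.insert x [x], buckets)
  | some bi => (st.1, st.2.1.modify bi.2 [] (fun l => l ++ [x]), st.2.2)

def uniqueListThreshold_alt (list_data : List Int) (threshold : Int) : List Int × (List (Int × List Int)) :=
  let st := list_data.foldl (pvBStep threshold) ([], PySem.Dict.empty, PySem.Dict.empty)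
  (st.1, st.2.1.items)

-- ===== PRECONDITION & SPEC =====
def Spec_uniqueListThreshold (list_data : List Int) (threshold : Int) (out : List Int × (List (Int × List Int))) : Prop := out = uniqueListThreshold_alt list_data threshold
instance (list_data : List Int) (threshold : Int) (out : List Int × (List (Int × List Int))) : Decidable (Spec_uniqueListThreshold list_data threshold out) := by unfold Spec_uniqueListThreshold; infer_instance

-- ===== CLAIM (what is proved, stated in full; the proofs are below) =====
def Claim_equal_uniqueListThreshold : Prop := ∀ (list_data : List Int) (threshold : Int), Dom_uniqueListThreshold list_data threshold → Spec_uniqueListThreshold list_data threshold (uniqueListThreshold list_data threshold)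

-- ===== LEMMAS AND PROOFS =====

-- enumerate uniques starting at index i
def pvEnum (i : Int) (l : List Int) : List (Int × Int) :=
  match l with
  | [] => []
  | y :: ys => (i, y) :: pvEnum (i + 1) ys

-- B's match condition as a Bool predicate on (index, value) pairs
def pvPm (x t : Int) (p : Int × Int) : Bool := decide (x - t < p.2 ∧ p.2 < x + t)

-- bucket invariant: each bucket holds exactly the enumerated uniques whose floordiv is its key
def pvInv (t : Int) (uniques : List Int) (bk : PySem.Dict Int (List (Int × Int))) : Prop :=
  ∀ b : Int, bk.getD b [] = (pvEnum 0 uniques).filter (fun p => PySem.Int.floordiv p.2 t == b)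

lemma pvEnum_key_ge (l : List Int) : ∀ (i : Int) (p : Int × Int), p ∈ pvEnum i l → i ≤ p.1 := by
  induction l with
  | nil => intro i p h; simp [pvEnum] at h
  | cons y ys ih =>
    intro i p h
    simp only [pvEnum, List.mem_cons] at h
    rcases h with rfl | h
    · simp
    · have := ih (i + 1) p h; omega

lemma pvEnum_inj (l : List Int) : ∀ (i : Int) (p q : Int × Int),
    p ∈ pvEnum i l → q ∈ pvEnum i l → p.1 = q.1 → p = q := by
  induction l with
  | nil => intro i p q h; simp [pvEnum] at h
  | cons y ys ih =>
    intro i p q hp hq hk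
    simp only [pvEnum, List.mem_cons] at hp hq
    rcases hp with rfl | hp <;> rcases hq with rfl | hq
    · rfl
    · have := pvEnum_key_ge ys (i + 1) q hq; simp at hk; omega
    · have := pvEnum_key_ge ys (i + 1) p hp; simp at hk; omega
    · exact ih (i + 1) p q hp hq hk

lemma pvEnum_append (l : List Int) (x : Int) : ∀ i : Int,
    pvEnum i (l ++ [x]) = pvEnum i l ++ [(i + l.length, x)] := by
  induction l with
  | nil => intro i; simp [pvEnum]
  | cons y ys ih =>
    intro i
    simp only [List.cons_append, pvEnum, ih (i + 1), List.length_cons]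
    push_cast
    ring_nf

-- A's first-match scan equals find? over the enumeration (with B's equivalent condition)
lemma pvAFind_eq_find (u : List Int) (x t : Int) : ∀ i : Int,
    pvAFind u x t = ((pvEnum i u).find? (pvPm x t)).map Prod.snd := by
  induction u with
  | nil => intro i; simp [pvAFind, pvEnum]
  | cons y ys ih =>
    intro i
    simp only [pvAFind, pvEnum, List.find?_cons]
    cases hP : pvPm x t (i, y) with
    | true =>
      have hc : y - t < x ∧ y + t > x := by
        simp only [pvPm, decide_eq_true_eq] at hP; exact ⟨by omega, by omega⟩
      rw [if_pos hc]
      rfl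
    | false =>
      have hc : ¬ (y - t < x ∧ y + t > x) := by
        intro hcc
        simp only [pvPm, decide_eq_false_iff_not] at hP
        exact hP ⟨by omega, by omega⟩
      rw [if_neg hc]
      exact ih (i + 1)

lemma pvAFind_of_nonpos (u : List Int) (x t : Int) (ht : t ≤ 0) : pvAFind u x t = none := by
  induction u with
  | nil => rfl
  | cons y ys ih =>
    simp only [pvAFind]
    rw [if_neg (by omega)]
    exact ih

-- find? over an enumeration returns the match with minimal index
lemma pvFind_min (u : List Int) (x t : Int) : ∀ (i : Int) (s : Int × Int),
    (pvEnum i u).find? (pvPm x t) = some s →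
    ∀ q ∈ pvEnum i u, pvPm x t q = true → s.1 ≤ q.1 := by
  induction u with
  | nil => intro i s h; simp [pvEnum] at h
  | cons y ys ih =>
    intro i s h q hq hPq
    simp only [pvEnum, List.find?_cons] at h hq
    by_cases hy : pvPm x t (i, y) = true
    · rw [hy] at h
      simp at h; subst h
      have : i ≤ q.1 := by
        rcases List.mem_cons.mp hq with rfl | hq'
        · simp
        · have := pvEnum_key_ge ys (i + 1) q hq'; omega
      simpa using this
    · rw [Bool.eq_false_iff.mpr hy] at h
      rcases List.mem_cons.mp hq with rfl | hq'
      · exact absurd hPq hy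
      · exact ih (i + 1) s h q hq' hPq

-- the bucket scan fold: specification of pvBScan
lemma pvBScan_spec (x t : Int) (items : List (Int × Int)) : ∀ (init : Option (Int × Int)),
    (pvBScan x t init items = none → init = none ∧ ∀ p ∈ items, pvPm x t p = false) ∧
    (∀ r, pvBScan x t init items = some r →
      ((r ∈ items ∧ pvPm x t r = true) ∨ init = some r) ∧
      (∀ q ∈ items, pvPm x t q = true → r.1 ≤ q.1) ∧
      (∀ p0, init = some p0 → r.1 ≤ p0.1)) := by
  induction items with
  | nil =>
    intro init
    refine ⟨fun h => ⟨h, by simp⟩, fun r h => ?_⟩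
    have h' : init = some r := h
    refine ⟨Or.inr h', by simp, fun p0 hp0 => ?_⟩
    rw [h'] at hp0
    injection hp0 with he
    simp [he]
  | cons a as ih =>
    intro init
    have hstep : pvBScan x t init (a :: as) =
        pvBScan x t (if x - t < a.2 ∧ a.2 < x + t ∧ (init.all (fun b => decide (a.1 < b.1)) = true)
          then some a else init) as := by
      simp [pvBScan]
    by_cases hc : x - t < a.2 ∧ a.2 < x + t ∧ (init.all (fun b => decide (a.1 < b.1)) = true)
    · rw [if_pos hc] at hstep
      have hPa : pvPm x t a = true := by
        simp only [pvPm, decide_eq_true_eq]; exact ⟨hc.1, hc.2.1⟩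
      constructor
      · intro h
        rw [hstep] at h
        rcases (ih (some a)).1 h with ⟨h1, _⟩
        exact absurd h1 (by simp)
      · intro r h
        rw [hstep] at h
        rcases (ih (some a)).2 r h with ⟨h1, h2, h3⟩
        refine ⟨?_, ?_, ?_⟩
        · rcases h1 with ⟨hm, hp⟩ | heq
          · exact Or.inl ⟨List.mem_cons_of_mem a hm, hp⟩
          · injection heq with he
            cases he
            exact Or.inl ⟨by simp, hPa⟩
        · intro q hq hPq
          rcases List.mem_cons.mp hq with hq1 | hq'
          · rw [hq1]; exact h3 a rfl
          · exact h2 q hq' hPq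
        · intro p0 hp0
          have hra : r.1 ≤ a.1 := h3 a rfl
          have hall := hc.2.2
          rw [hp0] at hall
          simp only [Option.all, decide_eq_true_eq] at hall
          omega
    · rw [if_neg hc] at hstep
      constructor
      · intro h
        rw [hstep] at h
        rcases (ih init).1 h with ⟨h1, h2⟩
        refine ⟨h1, ?_⟩
        intro p hp
        rcases List.mem_cons.mp hp with hp1 | hp'
        · rw [hp1]
          cases h1
          by_contra hPp
          simp only [Bool.not_eq_false, pvPm, decide_eq_true_eq] at hPp
          exact hc ⟨hPp.1, hPp.2, by simp⟩
        · exact h2 p hp'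
      · intro r h
        rw [hstep] at h
        rcases (ih init).2 r h with ⟨h1, h2, h3⟩
        refine ⟨?_, ?_, h3⟩
        · rcases h1 with ⟨hm, hp⟩ | heq
          · exact Or.inl ⟨List.mem_cons_of_mem a hm, hp⟩
          · exact Or.inr heq
        · intro q hq hPq
          rcases List.mem_cons.mp hq with hq1 | hq'
          · -- q = a matches but the update condition failed: init blocks with a smaller-or-equal key
            rw [hq1] at hPq ⊢
            by_cases hi : ∃ b0, init = some b0 ∧ ¬ a.1 < b0.1
            · rcases hi with ⟨b0, hb0, hge⟩
              have := h3 b0 hb0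
              omega
            · exfalso
              apply hc
              simp only [pvPm, decide_eq_true_eq] at hPq
              refine ⟨hPq.1, hPq.2, ?_⟩
              cases init with
              | none => simp
              | some b0 =>
                simp only [not_exists, not_and, not_not] at hi
                have := hi b0 rfl
                simpa using this
          · exact h2 q hq' hPq

-- arithmetic: a match lies in bucket k-1, k or k+1
lemma pvBucket_range (x u t : Int) (ht : 0 < t) (h1 : x - t < u) (h2 : u < x + t) :
    PySem.Int.floordiv u t = PySem.Int.floordiv x t - 1 ∨
    PySem.Int.floordiv u t = PySem.Int.floordiv x t ∨
    PySem.Int.floordiv u t = PySem.Int.floordiv x t + 1 := by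
  have hx := PySem.Int.floordiv_mul_add_mod x t
  have hu := PySem.Int.floordiv_mul_add_mod u t
  have hx1 := PySem.Int.mod_nonneg x ht
  have hx2 := PySem.Int.mod_lt x ht
  have hu1 := PySem.Int.mod_nonneg u ht
  have hu2 := PySem.Int.mod_lt u ht
  set qx := PySem.Int.floordiv x t
  set qu := PySem.Int.floordiv u t
  have hlt : (qu - qx) * t < 2 * t := by nlinarith
  have hgt : -(2 * t) < (qu - qx) * t := by nlinarith
  have h3 : qu - qx < 2 := by nlinarith
  have h4 : -2 < qu - qx := by nlinarith
  omega

-- under the invariant, B's three-bucket scan equals A's first-match search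
lemma pvBest_eq_find (t x : Int) (u : List Int) (bk : PySem.Dict Int (List (Int × Int)))
    (ht : 0 < t) (hinv : pvInv t u bk) :
    ([PySem.Int.floordiv x t - 1, PySem.Int.floordiv x t, PySem.Int.floordiv x t + 1].foldl
      (fun best b => pvBScan x t best (bk.getD b [])) none) =
    (pvEnum 0 u).find? (pvPm x t) := by
  set k := PySem.Int.floordiv x t with hk
  set E := pvEnum 0 u with hE
  set L := (bk.getD (k - 1) []) ++ (bk.getD k []) ++ (bk.getD (k + 1) []) with hL
  have hfold : ([k - 1, k, k + 1].foldl (fun best b => pvBScan x t best (bk.getD b [])) none) =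
      pvBScan x t none L := by
    simp [pvBScan, hL, List.foldl_append]
  rw [hfold]
  have hb : ∀ b : Int, bk.getD b [] = E.filter (fun p => PySem.Int.floordiv p.2 t == b) := hinv
  -- membership in L
  have hmemL : ∀ p, p ∈ L → p ∈ E := by
    intro p hp
    rw [hL] at hp
    simp only [List.mem_append, hb, List.mem_filter] at hp
    rcases hp with (h | h) | h <;> exact h.1
  have hmatchL : ∀ p ∈ E, pvPm x t p = true → p ∈ L := by
    intro p hp hPp
    simp only [pvPm, decide_eq_true_eq] at hPp
    rw [hL]
    simp only [List.mem_append, hb, List.mem_filter]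
    rcases pvBucket_range x p.2 t ht hPp.1 hPp.2 with h | h | h
    · exact Or.inl (Or.inl ⟨hp, by simp [h, hk]⟩)
    · exact Or.inl (Or.inr ⟨hp, by simp [h, hk]⟩)
    · exact Or.inr ⟨hp, by simp [h, hk]⟩
  rcases hscan : pvBScan x t none L with _ | r
  · -- no match in buckets → no match in E
    rcases (pvBScan_spec x t L none).1 hscan with ⟨_, hno⟩
    symm
    rw [List.find?_eq_none]
    intro p hp
    simp only [Bool.not_eq_true]
    by_contra hPp
    simp only [Bool.not_eq_false] at hPp
    exact absurd hPp (by simp [hno p (hmatchL p hp hPp)])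
  · rcases (pvBScan_spec x t L none).2 r hscan with ⟨h1, h2, _⟩
    rcases h1 with ⟨hrL, hPr⟩ | heq
    · have hrE : r ∈ E := hmemL r hrL
      rcases hfind : E.find? (pvPm x t) with _ | s
      · rw [List.find?_eq_none] at hfind
        exact absurd hPr (by simpa using hfind r hrE)
      · have hsE : s ∈ E := List.mem_of_find?_eq_some hfind
        have hPs : pvPm x t s = true := List.find?_some hfind
        have h5 : s.1 ≤ r.1 := pvFind_min u x t 0 s hfind r hrE hPr
        have h6 : r.1 ≤ s.1 := h2 s (hmatchL s hsE hPs) hPs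
        have : r = s := pvEnum_inj u 0 r s hrE hsE (by omega)
        rw [this]
    · exact absurd heq (by simp)

-- invariant is preserved when a new unique x is appended (threshold positive case)
lemma pvInv_append (t x : Int) (u : List Int) (bk : PySem.Dict Int (List (Int × Int)))
    (hinv : pvInv t u bk) :
    pvInv t (u ++ [x]) (bk.modify (PySem.Int.floordiv x t) [] (fun l => l ++ [((u.length : Int), x)])) := by
  intro b
  rw [PySem.Dict.getD_modify]
  rw [pvEnum_append u x 0, List.filter_append]
  have hbase := hinv b
  by_cases hb : b = PySem.Int.floordiv x t
  · rw [if_pos hb, hinv (PySem.Int.floordiv x t)]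
    subst hb
    simp
  · rw [if_neg hb, hbase]
    have : (PySem.Int.floordiv x t == b) = false := by simp; omega
    simp [this]

-- main loop invariant: the two folds keep equal uniques and full_list
lemma pvLoop (l : List Int) (t : Int) :
    ∀ (u : List Int) (f : PySem.Dict Int (List Int)) (bk : PySem.Dict Int (List (Int × Int))),
    (0 < t → pvInv t u bk) →
    (l.foldl (pvAStep t) (u, f)).1 = (l.foldl (pvBStep t) (u, f, bk)).1 ∧
    (l.foldl (pvAStep t) (u, f)).2 = (l.foldl (pvBStep t) (u, f, bk)).2.1 := by
  induction l with
  | nil => intro u f bk _; exact ⟨rfl, rfl⟩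
  | cons x xs ih =>
    intro u f bk hinv
    simp only [List.foldl_cons]
    by_cases ht : 0 < t
    · have hbest := pvBest_eq_find t x u bk ht (hinv ht)
      have hfind := pvAFind_eq_find u x t 0
      rcases hF : (pvEnum 0 u).find? (pvPm x t) with _ | p
      · -- new unique in both
        have hA : pvAStep t (u, f) x = (u ++ [x], f.insert x [x]) := by
          simp [pvAStep, hfind, hF]
        have hB : pvBStep t (u, f, bk) x =
            (u ++ [x], f.insert x [x],
              bk.modify (PySem.Int.floordiv x t) [] (fun l => l ++ [((u.length : Int), x)])) := by
          simp only [pvBStep, if_pos ht]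
          rw [hbest, hF]
        rw [hA, hB]
        exact ih (u ++ [x]) (f.insert x [x]) _ (fun _ => pvInv_append t x u bk (hinv ht))
      · -- matched p in both
        have hA : pvAStep t (u, f) x = (u, f.modify p.2 [] (fun l => l ++ [x])) := by
          simp [pvAStep, hfind, hF]
        have hB : pvBStep t (u, f, bk) x = (u, f.modify p.2 [] (fun l => l ++ [x]), bk) := by
          simp only [pvBStep, if_pos ht]
          rw [hbest, hF]
        rw [hA, hB]
        exact ih u (f.modify p.2 [] (fun l => l ++ [x])) bk hinv
    · have hA : pvAStep t (u, f) x = (u ++ [x], f.insert x [x]) := by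
        simp [pvAStep, pvAFind_of_nonpos u x t (by omega)]
      have hB : pvBStep t (u, f, bk) x = (u ++ [x], f.insert x [x], bk) := by
        simp [pvBStep, if_neg ht]
      rw [hA, hB]
      exact ih (u ++ [x]) (f.insert x [x]) bk (fun h => absurd h ht)

-- ===== VERDICT (by name: the statement is the Claim_ definition above) =====
theorem uniqueListThreshold_spec : Claim_equal_uniqueListThreshold := by
  intro list_data threshold _
  unfold Spec_uniqueListThreshold uniqueListThreshold uniqueListThreshold_alt
  have h := pvLoop list_data threshold [] PySem.Dict.empty PySem.Dict.empty
    (by intro _ b; simp [PySem.Dict.getD_empty, pvEnum])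
  simp only []
  rw [Prod.ext_iff]
  exact ⟨h.1, by rw [h.2]⟩
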